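-- pv_equiv track=rewrite | github.com/kirka00/ege | course_kabanov/19/5.py | f
-- ===== SOURCE A (Python) =====
-- def f(x, y, p):
-- 	if x + y >= 68 or p > 4:
-- 		return p == 2 or p == 4
-- 	if p % 2 == 0:
-- 		return f(x + 1, y, p + 1) and f(x, y + 1, p + 1) and f(x + y, y, p + 1) and \
--     f(x, y + x, p + 1)
-- 	else:
-- 		return f(x + 1, y, p + 1) or f(x, y + 1, p + 1) or f(x + y, y, p + 1) or \
--     f(x, y + x, p + 1)
-- ===== SOURCE B (Python) =====
-- def f(x, y, p):
--     memo = {}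
--
--     def go(x, y, p):
--         if x + y >= 68 or p > 4:
--             return p == 2 or p == 4
--         k = (x, y, p)
--         if k in memo:
--             return memo[k]
--         if p % 2 == 0:
--             r = go(x + 1, y, p + 1) and go(x, y + 1, p + 1) \
--                 and go(x + y, y, p + 1) and go(x, y + x, p + 1)
--         else:
--             r = go(x + 1, y, p + 1) or go(x, y + 1, p + 1) \
--                 or go(x + y, y, p + 1) or go(x, y + x, p + 1)
--         memo[k] = r
--         return r
--
--     return go(x, y, p)
-- ===== Notes on version B (the rewrite author's own statement) =====
-- stated objective: alternative
-- what changed: Replaced the naive exponential game-tree recursion with a recursion over an explicit memo dict keyed by (x, y, p), threading the table through the short-circuiting AND/OR child evaluations so repeated positions are computed once.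
-- outside the precondition, e.g. on f(67, 0, -9001): A returns False, B returns False; on f(-20000, 0, -20000): A raises RecursionError, B raises RecursionError
import Mathlib
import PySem

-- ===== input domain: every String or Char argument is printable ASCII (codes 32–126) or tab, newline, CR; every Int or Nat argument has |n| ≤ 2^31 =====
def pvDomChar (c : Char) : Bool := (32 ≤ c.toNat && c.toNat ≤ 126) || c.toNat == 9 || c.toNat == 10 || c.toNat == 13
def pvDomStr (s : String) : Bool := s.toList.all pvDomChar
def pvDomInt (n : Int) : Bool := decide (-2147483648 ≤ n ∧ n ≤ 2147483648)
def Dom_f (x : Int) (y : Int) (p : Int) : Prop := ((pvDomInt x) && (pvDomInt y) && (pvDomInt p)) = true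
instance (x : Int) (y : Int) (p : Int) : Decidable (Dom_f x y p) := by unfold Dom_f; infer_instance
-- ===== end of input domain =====

-- B replaces A's naive game-tree recursion by the same game recursion over an explicit
-- memo dict keyed by (x, y, p) (alternative decomposition; return value proved equal).

-- ===== PORT A =====
def f (x : Int) (y : Int) (p : Int) : Bool :=
  if x + y ≥ 68 ∨ p > 4 then (p == 2 || p == 4)
  else if PySem.Int.mod p 2 == 0 then
    f (x + 1) y (p + 1) && f x (y + 1) (p + 1) && f (x + y) y (p + 1) && f x (y + x) (p + 1)
  else
    f (x + 1) y (p + 1) || f x (y + 1) (p + 1) || f (x + y) y (p + 1) || f x (y + x) (p + 1)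
termination_by (5 - p).toNat
decreasing_by all_goals omega

-- ===== PORT B =====
-- memo-threading state of Source B's inner helper: (result, memo table)
-- `r = go(..) and go(..) and go(..) and go(..)` threading the memo, short-circuiting like Python's `and`
def fAnd4 (c1 c2 c3 c4 : Std.HashMap (Int × Int × Int) Bool → Bool × Std.HashMap (Int × Int × Int) Bool)
    (m : Std.HashMap (Int × Int × Int) Bool) : Bool × Std.HashMap (Int × Int × Int) Bool :=
  let r1 := c1 m
  if r1.1 then
    let r2 := c2 r1.2
    if r2.1 then
      let r3 := c3 r2.2
      if r3.1 then c4 r3.2 else (false, r3.2)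
    else (false, r2.2)
  else (false, r1.2)

-- `r = go(..) or go(..) or go(..) or go(..)` threading the memo, short-circuiting like Python's `or`
def fOr4 (c1 c2 c3 c4 : Std.HashMap (Int × Int × Int) Bool → Bool × Std.HashMap (Int × Int × Int) Bool)
    (m : Std.HashMap (Int × Int × Int) Bool) : Bool × Std.HashMap (Int × Int × Int) Bool :=
  let r1 := c1 m
  if r1.1 then (true, r1.2)
  else
    let r2 := c2 r1.2
    if r2.1 then (true, r2.2)
    else
      let r3 := c3 r2.2
      if r3.1 then (true, r3.2) else c4 r3.2

-- `memo[k] = r; return r`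
def fStep (key : Int × Int × Int) (res : Bool × Std.HashMap (Int × Int × Int) Bool) :
    Bool × Std.HashMap (Int × Int × Int) Bool :=
  (res.1, res.2.insert key res.1)

-- inner helper `go` of Source B: threads the memo table through the four child calls
def fGo (x : Int) (y : Int) (p : Int) (memo : Std.HashMap (Int × Int × Int) Bool) :
    Bool × Std.HashMap (Int × Int × Int) Bool :=
  if x + y ≥ 68 ∨ p > 4 then ((p == 2 || p == 4), memo)
  else
    match memo[(x, y, p)]? with
    | some v => (v, memo)
    | none =>
      fStep (x, y, p) <|
        if PySem.Int.mod p 2 == 0 then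
          fAnd4 (fun m => fGo (x + 1) y (p + 1) m) (fun m => fGo x (y + 1) (p + 1) m)
                (fun m => fGo (x + y) y (p + 1) m) (fun m => fGo x (y + x) (p + 1) m) memo
        else
          fOr4 (fun m => fGo (x + 1) y (p + 1) m) (fun m => fGo x (y + 1) (p + 1) m)
               (fun m => fGo (x + y) y (p + 1) m) (fun m => fGo x (y + x) (p + 1) m) memo
termination_by (5 - p).toNat
decreasing_by all_goals omega

def f_alt (x : Int) (y : Int) (p : Int) : Bool := (fGo x y p ∅).1

-- ===== PRECONDITION & SPEC =====
-- Pre_ excludes only positions with x ≤ 0 or y ≤ 0, x + y < 68 and p < -9000, on which A's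
-- depth-(5−p) recursion can exceed the interpreter's recursion limit (RecursionError, e.g. at
-- (-20000, 0, -20000)); a few such positions still return via an immediate short-circuit
-- (cited in claim.json). Inside Pre_ the recursion depth stays below the limit
-- (for 1 ≤ x and 1 ≤ y the sum x + y grows every move, bounding the depth by 67).
def Pre_f (x : Int) (y : Int) (p : Int) : Prop := x + y ≥ 68 ∨ (1 ≤ x ∧ 1 ≤ y) ∨ -9000 ≤ p
instance (x : Int) (y : Int) (p : Int) : Decidable (Pre_f x y p) := by unfold Pre_f; infer_instance
def pvWitness_f : Int × Int × Int := (0, 0, 1)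

def Spec_f (x : Int) (y : Int) (p : Int) (out : Bool) : Prop := out = f_alt x y p
instance (x : Int) (y : Int) (p : Int) (out : Bool) : Decidable (Spec_f x y p out) := by unfold Spec_f; infer_instance

-- ===== CLAIM (what is proved, stated in full; the proofs are below) =====
def Claim_equal_f : Prop := ∀ (x : Int) (y : Int) (p : Int), Dom_f x y p → Pre_f x y p → Spec_f x y p (f x y p)

-- ===== LEMMAS AND PROOFS =====

-- invariant: every value cached in the memo is the true game value of its key
def MemoOK (memo : Std.HashMap (Int × Int × Int) Bool) : Prop :=
  ∀ (k : Int × Int × Int) (v : Bool), memo[k]? = some v → v = f k.1 k.2.1 k.2.2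

-- a memo-threading child computation that returns value b and preserves the invariant
def ChildOK (b : Bool)
    (c : Std.HashMap (Int × Int × Int) Bool → Bool × Std.HashMap (Int × Int × Int) Bool) : Prop :=
  ∀ m, MemoOK m → (c m).1 = b ∧ MemoOK (c m).2

theorem memoOK_insert {memo : Std.HashMap (Int × Int × Int) Bool} {k : Int × Int × Int} {v : Bool}
    (hm : MemoOK memo) (hv : v = f k.1 k.2.1 k.2.2) : MemoOK (memo.insert k v) := by
  intro k' w hw
  rw [Std.HashMap.getElem?_insert] at hw
  by_cases hk : k = k'
  · subst hk; simp at hw; subst hw; exact hv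
  · simp only [beq_iff_eq, if_neg hk] at hw; exact hm k' w hw

theorem fAnd4_correct {b1 b2 b3 b4 : Bool} {c1 c2 c3 c4 :
      Std.HashMap (Int × Int × Int) Bool → Bool × Std.HashMap (Int × Int × Int) Bool}
    (h1 : ChildOK b1 c1) (h2 : ChildOK b2 c2) (h3 : ChildOK b3 c3) (h4 : ChildOK b4 c4)
    {m : Std.HashMap (Int × Int × Int) Bool} (hm : MemoOK m) :
    (fAnd4 c1 c2 c3 c4 m).1 = (b1 && b2 && b3 && b4) ∧ MemoOK (fAnd4 c1 c2 c3 c4 m).2 := by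
  obtain ⟨e1, k1⟩ := h1 m hm
  unfold fAnd4
  simp only []
  rw [e1]
  cases b1 with
  | false => exact ⟨rfl, k1⟩
  | true =>
    simp only [if_true]
    obtain ⟨e2, k2⟩ := h2 _ k1
    rw [e2]
    cases b2 with
    | false => exact ⟨rfl, k2⟩
    | true =>
      simp only [if_true]
      obtain ⟨e3, k3⟩ := h3 _ k2
      rw [e3]
      cases b3 with
      | false => exact ⟨rfl, k3⟩
      | true =>
        simp only [if_true, Bool.true_and]
        exact h4 _ k3

theorem fOr4_correct {b1 b2 b3 b4 : Bool} {c1 c2 c3 c4 :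
      Std.HashMap (Int × Int × Int) Bool → Bool × Std.HashMap (Int × Int × Int) Bool}
    (h1 : ChildOK b1 c1) (h2 : ChildOK b2 c2) (h3 : ChildOK b3 c3) (h4 : ChildOK b4 c4)
    {m : Std.HashMap (Int × Int × Int) Bool} (hm : MemoOK m) :
    (fOr4 c1 c2 c3 c4 m).1 = (b1 || b2 || b3 || b4) ∧ MemoOK (fOr4 c1 c2 c3 c4 m).2 := by
  obtain ⟨e1, k1⟩ := h1 m hm
  unfold fOr4
  simp only []
  rw [e1]
  cases b1 with
  | true => exact ⟨rfl, k1⟩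
  | false =>
    simp only [Bool.false_eq_true, if_false]
    obtain ⟨e2, k2⟩ := h2 _ k1
    rw [e2]
    cases b2 with
    | true => exact ⟨rfl, k2⟩
    | false =>
      simp only [Bool.false_eq_true, if_false]
      obtain ⟨e3, k3⟩ := h3 _ k2
      rw [e3]
      cases b3 with
      | true => exact ⟨rfl, k3⟩
      | false =>
        simp only [Bool.false_eq_true, if_false, Bool.false_or]
        exact h4 _ k3

theorem fStep_correct {k : Int × Int × Int} {res : Bool × Std.HashMap (Int × Int × Int) Bool}
    (hv : res.1 = f k.1 k.2.1 k.2.2) (hm : MemoOK res.2) :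
    (fStep k res).1 = f k.1 k.2.1 k.2.2 ∧ MemoOK (fStep k res).2 :=
  ⟨hv, memoOK_insert hm hv⟩

theorem fGo_correct (n : ℕ) : ∀ (x y p : Int) (memo : Std.HashMap (Int × Int × Int) Bool),
    (5 - p).toNat ≤ n → MemoOK memo →
    (fGo x y p memo).1 = f x y p ∧ MemoOK (fGo x y p memo).2 := by
  induction n with
  | zero =>
    intro x y p memo hn hm
    have hp : p > 4 := by omega
    rw [fGo, f]
    simp only [if_pos (Or.inr hp)]
    exact ⟨trivial, hm⟩
  | succ n ih =>
    intro x y p memo hn hm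
    by_cases hterm : x + y ≥ 68 ∨ p > 4
    · rw [fGo, f]
      simp only [if_pos hterm]
      exact ⟨trivial, hm⟩
    · have hd : (5 - (p + 1)).toNat ≤ n := by omega
      have g1 : ChildOK (f (x + 1) y (p + 1)) (fun m => fGo (x + 1) y (p + 1) m) :=
        fun m hm' => ih (x + 1) y (p + 1) m hd hm'
      have g2 : ChildOK (f x (y + 1) (p + 1)) (fun m => fGo x (y + 1) (p + 1) m) :=
        fun m hm' => ih x (y + 1) (p + 1) m hd hm'
      have g3 : ChildOK (f (x + y) y (p + 1)) (fun m => fGo (x + y) y (p + 1) m) :=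
        fun m hm' => ih (x + y) y (p + 1) m hd hm'
      have g4 : ChildOK (f x (y + x) (p + 1)) (fun m => fGo x (y + x) (p + 1) m) :=
        fun m hm' => ih x (y + x) (p + 1) m hd hm'
      rw [fGo]
      simp only [if_neg hterm]
      cases hget : memo[(x, y, p)]? with
      | some v => exact ⟨hm (x, y, p) v hget, hm⟩
      | none =>
        by_cases hpar : (PySem.Int.mod p 2 == 0) = true
        · simp only [if_pos hpar]
          obtain ⟨hv, hk⟩ := fAnd4_correct g1 g2 g3 g4 hm
          have hfx : f x y p = (f (x + 1) y (p + 1) && f x (y + 1) (p + 1) && f (x + y) y (p + 1) && f x (y + x) (p + 1)) := by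
            rw [f, if_neg hterm, if_pos hpar]
          exact fStep_correct (k := (x, y, p)) (hv.trans hfx.symm) hk
        · simp only [if_neg hpar]
          obtain ⟨hv, hk⟩ := fOr4_correct g1 g2 g3 g4 hm
          have hfx : f x y p = (f (x + 1) y (p + 1) || f x (y + 1) (p + 1) || f (x + y) y (p + 1) || f x (y + x) (p + 1)) := by
            rw [f, if_neg hterm, if_neg hpar]
          exact fStep_correct (k := (x, y, p)) (hv.trans hfx.symm) hk

theorem f_eq_f_alt (x y p : Int) : f x y p = f_alt x y p := by
  unfold f_alt
  have h := fGo_correct (5 - p).toNat x y p ∅ (le_refl _) (by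
    intro k v hv
    simp at hv)
  exact h.1.symm

-- ===== VERDICT (by name: the statement is the Claim_ definition above) =====
theorem f_spec : Claim_equal_f := by
  intro x y p _ _
  unfold Spec_f
  exact f_eq_f_alt x y p
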